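-- pv_equiv track=rewrite | github.com/HumanChwan/CookieBot | src/MathCookie.py | string_to_infix_list
-- ===== SOURCE A (Python) =====
-- def string_to_infix_list(inf):
--     cache = ''
--     final_infix_list = []
--     for c in inf:
--         if c == ' ':
--             if cache != '':
--                 final_infix_list.append(cache)
--                 cache = ''
--         elif '0' <= c <= '9' or c == '.':
--             cache += c
--         elif c in {'+', '-', '*', '/', '^', '(', ')', '%'}:
--             if cache != '':
--                 final_infix_list.append(cache)
--                 cache = ''
--             final_infix_list.append(c)
--         else:
--             return None
--     if cache != '':
--         final_infix_list.append(cache)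
--
--     return final_infix_list
-- ===== SOURCE B (Python) =====
-- _NUM = set('0123456789.')
-- _OPS = set('+-*/^()%')
--
-- def string_to_infix_list(inf):
--     # phase 1: validate; any character outside the allowed set means None
--     if any(c != ' ' and c not in _NUM and c not in _OPS for c in inf):
--         return None
--     # phase 2: span-based tokenizer: take maximal numeric runs, single-char operators
--     tokens = []
--     i, n = 0, len(inf)
--     while i < n:
--         c = inf[i]
--         if c in _NUM:
--             j = i + 1
--             while j < n and inf[j] in _NUM:
--                 j += 1
--             tokens.append(inf[i:j])
--             i = j
--         elif c in _OPS:
--             tokens.append(c)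
--             i += 1
--         else:  # space
--             i += 1
--     return tokens
-- ===== Notes on version B (the rewrite author's own statement) =====
-- stated objective: alternative
-- what changed: Replaces A's single stateful scan with a mutable cache accumulator by a two-phase approach: first validate every character against the allowed set (reject with None otherwise), then tokenize with a span-based index loop that takes maximal digit/dot runs and single operator characters.
import Mathlib
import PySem

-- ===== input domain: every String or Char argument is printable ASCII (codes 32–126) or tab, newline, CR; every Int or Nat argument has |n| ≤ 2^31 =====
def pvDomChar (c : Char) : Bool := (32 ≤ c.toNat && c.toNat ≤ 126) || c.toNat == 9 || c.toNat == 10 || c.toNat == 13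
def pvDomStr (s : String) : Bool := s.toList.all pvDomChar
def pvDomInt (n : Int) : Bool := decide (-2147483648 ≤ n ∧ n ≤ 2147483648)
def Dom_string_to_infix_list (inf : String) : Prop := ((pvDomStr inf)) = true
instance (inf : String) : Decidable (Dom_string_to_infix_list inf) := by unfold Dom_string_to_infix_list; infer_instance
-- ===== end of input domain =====

-- B replaces A's stateful cache-accumulator scan by validate-all-characters-first, then a
-- span-based tokenizer (maximal numeric runs, single-char operators); objective: alternative.

-- ===== PORT A =====
def pvIsNumA (c : Char) : Bool := ('0' ≤ c && c ≤ '9') || c == '.'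
def pvIsOpA (c : Char) : Bool :=
  c == '+' || c == '-' || c == '*' || c == '/' || c == '^' || c == '(' || c == ')' || c == '%'

-- the for-loop of A: state = (cache, final_infix_list); 'return None' = none
def pvGoA : List Char → List Char → List String → Option (List String)
  | [], cache, acc =>
      some (if cache = [] then acc else acc ++ [String.mk cache])
  | c :: cs, cache, acc =>
      if c == ' ' then
        pvGoA cs [] (if cache = [] then acc else acc ++ [String.mk cache])
      else if pvIsNumA c then
        pvGoA cs (cache ++ [c]) acc
      else if pvIsOpA c then
        pvGoA cs [] ((if cache = [] then acc else acc ++ [String.mk cache]) ++ [String.mk [c]])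
      else
        none

def string_to_infix_list (inf : String) : Option (List String) :=
  pvGoA inf.toList [] []

-- ===== PORT B =====
def pvAllowedB (c : Char) : Bool := c == ' ' || pvIsNumA c || pvIsOpA c

-- the index/while tokenizer of B: a numeric head takes its maximal run (the inner while = takeWhile)
def pvTokB : List Char → List String
  | [] => []
  | c :: cs =>
      if pvIsNumA c then
        String.mk (c :: cs.takeWhile pvIsNumA) :: pvTokB (cs.dropWhile pvIsNumA)
      else if pvIsOpA c then
        String.mk [c] :: pvTokB cs
      else
        pvTokB cs
  termination_by cs => cs.length
  decreasing_by
    · simpa using Nat.lt_succ_of_le (List.length_dropWhile_le ..)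
    · simp
    · simp

def string_to_infix_list_alt (inf : String) : Option (List String) :=
  if inf.toList.all pvAllowedB then some (pvTokB inf.toList) else none

-- ===== PRECONDITION & SPEC =====
def Spec_string_to_infix_list (inf : String) (out : Option (List String)) : Prop := out = string_to_infix_list_alt inf
instance (inf : String) (out : Option (List String)) : Decidable (Spec_string_to_infix_list inf out) := by unfold Spec_string_to_infix_list; infer_instance

-- ===== CLAIM (what is proved, stated in full; the proofs are below) =====
def Claim_equal_string_to_infix_list : Prop := ∀ (inf : String), Dom_string_to_infix_list inf → Spec_string_to_infix_list inf (string_to_infix_list inf)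

-- ===== LEMMAS AND PROOFS =====

-- if some character is not allowed, A's loop returns none
theorem pvGoA_none (cs : List Char) :
    ∀ cache acc, cs.all pvAllowedB = false → pvGoA cs cache acc = none := by
  induction cs with
  | nil => simp
  | cons c cs ih =>
      intro cache acc h
      simp only [List.all_cons, Bool.and_eq_false_iff] at h
      by_cases hsp : (c == ' ') = true
      · have : cs.all pvAllowedB = false := by
          rcases h with h | h
          · simp [pvAllowedB, hsp] at h
          · exact h
        simp [pvGoA, hsp, ih _ _ this]
      · by_cases hnum : pvIsNumA c = true
        · have : cs.all pvAllowedB = false := by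
            rcases h with h | h
            · simp [pvAllowedB, hnum] at h
            · exact h
          simp [pvGoA, hsp, hnum, ih _ _ this]
        · by_cases hop : pvIsOpA c = true
          · have : cs.all pvAllowedB = false := by
              rcases h with h | h
              · simp [pvAllowedB, hop] at h
              · exact h
            simp [pvGoA, hsp, hnum, hop, ih _ _ this]
          · simp [pvGoA, hsp, hnum, hop]

-- on allowed input, A's loop produces acc ++ tokens; stated jointly for empty and nonempty cache
theorem pvGoA_tok (cs : List Char) :
    cs.all pvAllowedB = true →
      (∀ acc, pvGoA cs [] acc = some (acc ++ pvTokB cs)) ∧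
      (∀ cache acc, cache ≠ [] →
        pvGoA cs cache acc =
          some (acc ++ String.mk (cache ++ cs.takeWhile pvIsNumA) ::
                  pvTokB (cs.dropWhile pvIsNumA))) := by
  induction cs with
  | nil =>
      intro _
      constructor
      · intro acc; simp [pvGoA, pvTokB]
      · intro cache acc hc; simp [pvGoA, pvTokB, hc]
  | cons c cs ih =>
      intro hall
      simp only [List.all_cons, Bool.and_eq_true] at hall
      obtain ⟨hc, hcs⟩ := hall
      obtain ⟨ih0, ih1⟩ := ih hcs
      by_cases hsp : (c == ' ') = true
      · have hce : c = ' ' := eq_of_beq hsp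
        have hnum : pvIsNumA c = false := by subst hce; decide
        have hop : pvIsOpA c = false := by subst hce; decide
        constructor
        · intro acc; simp [pvGoA, hsp, pvTokB, hnum, hop, ih0]
        · intro cache acc hcne
          simp [pvGoA, hsp, hcne, pvTokB, hnum, hop, ih0, List.takeWhile, List.dropWhile]
      · by_cases hnum : pvIsNumA c = true
        · constructor
          · intro acc
            simp only [pvGoA, hsp, hnum, if_true, List.nil_append]
            rw [(ih1 [c] acc (by simp))]
            simp [pvTokB, hnum]
          · intro cache acc hcne
            simp only [pvGoA, hsp, hnum, if_true]
            rw [ih1 (cache ++ [c]) acc (by simp [hcne])]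
            simp [List.takeWhile, List.dropWhile, hnum]
        · have hop : pvIsOpA c = true := by
            simp [pvAllowedB, hsp, hnum] at hc; exact hc
          constructor
          · intro acc
            simp [pvGoA, hsp, hnum, hop, pvTokB, ih0]
          · intro cache acc hcne
            simp [pvGoA, hsp, hnum, hop, hcne, pvTokB, ih0,
                  List.takeWhile, List.dropWhile]

-- ===== VERDICT (by name: the statement is the Claim_ definition above) =====
theorem string_to_infix_list_spec : Claim_equal_string_to_infix_list := by
  intro inf _
  unfold Spec_string_to_infix_list string_to_infix_list string_to_infix_list_alt
  by_cases h : inf.toList.all pvAllowedB = true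
  · rw [if_pos h, (pvGoA_tok inf.toList h).1 []]
    simp
  · rw [if_neg h, pvGoA_none _ _ _ (by simpa using h)]
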